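-- pv_equiv track=rewrite | github.com/pypi-data/pypi-mirror-320 | packages/kapito/kapito-0.3.0-py3-none-any.whl/kapito/main.py | _check_headers_and_cookies
-- ===== SOURCE A (Python) =====
-- from typing import Set, Tuple, Optional
--
-- def _check_headers_and_cookies(
--
--     rules: dict,
--     headers: dict,
--     cookies: dict
-- ) -> Set[str]:
--     """Check headers and cookies against compiled rules.
--
--     Args:
--         rules (dict): Compiled rules to check against.
--         headers (dict): HTTP headers to analyze.
--         cookies (dict): Cookies to analyze.
--
--     Returns:
--         Set[str]: Set of matched rule names.
--     """
--     results = set()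
--     headers_keys = {k.lower(): v for k, v in headers.items()} if headers else {}
--     cookies_keys = {k.lower(): v for k, v in cookies.items()} if cookies else {}
--
--     for name, rule in rules.items():
--         if rule['headers'] and headers_keys:
--             rule_headers = {h.lower() for h in rule['headers']}
--             if rule_headers & headers_keys.keys():
--                 results.add(name)
--                 continue
--
--         if rule['cookies'] and cookies_keys:
--             rule_cookies = {c.lower() for c in rule['cookies']}
--             if rule_cookies & cookies_keys.keys():
--                 results.add(name)
--
--     return results
-- ===== SOURCE B (Python) =====
-- def _check_headers_and_cookies(rules, headers, cookies):
--     """Inverted-index re-implementation: index rule names by the (lowercased)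
--     header/cookie keys they reference, then look up only the keys actually
--     present in the request."""
--     header_index = {}
--     cookie_index = {}
--     for name, rule in rules.items():
--         for h in rule['headers']:
--             header_index.setdefault(h.lower(), set()).add(name)
--         for c in rule['cookies']:
--             cookie_index.setdefault(c.lower(), set()).add(name)
--     matched = set()
--     for k in headers:
--         matched |= header_index.get(k.lower(), set())
--     for k in cookies:
--         matched |= cookie_index.get(k.lower(), set())
--     return {name for name in rules if name in matched}
-- ===== Notes on version B (the rewrite author's own statement) =====
-- stated objective: alternative
-- what changed: Instead of scanning each rule's header/cookie key lists against the request per rule, B builds an inverted index from lowercased keys to rule names in one pass over the rules and then unions the index entries of only the keys actually present in the request.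
-- outside the precondition, e.g. on _check_headers_and_cookies({'r': {'headers': ['x']}}, {'x': '1'}, {}): A returns {'r'}, B raises KeyError; on _check_headers_and_cookies({'r': {'cookies': ['c']}}, {}, {}): A raises KeyError, B raises KeyError
import Mathlib
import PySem

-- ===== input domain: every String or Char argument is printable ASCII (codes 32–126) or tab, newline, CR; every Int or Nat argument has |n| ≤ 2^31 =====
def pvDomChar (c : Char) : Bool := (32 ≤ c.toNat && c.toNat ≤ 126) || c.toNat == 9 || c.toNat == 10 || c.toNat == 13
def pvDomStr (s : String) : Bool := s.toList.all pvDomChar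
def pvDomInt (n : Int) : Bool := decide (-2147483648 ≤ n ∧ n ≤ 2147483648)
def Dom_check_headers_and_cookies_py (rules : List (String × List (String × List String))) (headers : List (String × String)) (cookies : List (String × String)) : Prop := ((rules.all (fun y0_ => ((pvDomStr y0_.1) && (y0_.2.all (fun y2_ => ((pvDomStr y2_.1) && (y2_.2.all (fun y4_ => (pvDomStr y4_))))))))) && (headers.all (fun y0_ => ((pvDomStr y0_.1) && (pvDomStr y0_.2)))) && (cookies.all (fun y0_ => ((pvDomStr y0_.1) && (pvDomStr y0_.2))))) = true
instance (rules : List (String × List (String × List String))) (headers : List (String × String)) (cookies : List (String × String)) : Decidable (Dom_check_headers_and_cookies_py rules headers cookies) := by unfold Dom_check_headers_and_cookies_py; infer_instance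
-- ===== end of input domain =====

-- B replaces A's per-rule scan of key lists with an inverted index from lowercased keys to rule names,
-- looked up only at the keys present in the request (objective: alternative data structure, same result).

-- ===== PORT A =====
-- rule['headers'] / rule['cookies']: first-match association-list lookup (dict convention);
-- the [] default is only taken outside Pre_ (Python raises KeyError there).
def pvRuleGet (rule : List (String × List String)) (k : String) : List String :=
  (List.lookup k rule).getD []

-- `{k.lower(): v for k, v in headers.items()} if headers else {}`
def pvKeysDict (h : List (String × String)) : PySem.Dict String String :=
  if !h.isEmpty then PySem.Dict.ofList (h.map (fun p => (PySem.Str.lower p.1, p.2))) else PySem.Dict.empty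

def check_headers_and_cookies_py (rules : List (String × List (String × List String))) (headers : List (String × String)) (cookies : List (String × String)) : List String :=
  let headersKeys := pvKeysDict headers
  let cookiesKeys := pvKeysDict cookies
  rules.foldl (fun results p =>
    -- `cookieCheck` is the code after a non-taken `continue`: the cookie branch
    let cookieCheck := fun (results : PySem.Set String) =>
      let rc := pvRuleGet p.2 "cookies"
      if !rc.isEmpty && !cookiesKeys.items.isEmpty then
        let ruleCookies : PySem.Set String := PySem.Set.ofList (rc.map PySem.Str.lower)
        if !(PySem.Set.inter ruleCookies cookiesKeys.keys).isEmpty then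
          PySem.Set.add results p.1
        else results
      else results
    let rh := pvRuleGet p.2 "headers"
    if !rh.isEmpty && !headersKeys.items.isEmpty then
      let ruleHeaders : PySem.Set String := PySem.Set.ofList (rh.map PySem.Str.lower)
      if !(PySem.Set.inter ruleHeaders headersKeys.keys).isEmpty then
        PySem.Set.add results p.1   -- `continue`
      else cookieCheck results
    else cookieCheck results) PySem.Set.empty

-- ===== PORT B =====
-- one loop over the rules building both inverted indexes (`setdefault(k, set()).add(name)` = Dict.modify)
def pvBuildIndexes (rules : List (String × List (String × List String))) : PySem.Dict String (PySem.Set String) × PySem.Dict String (PySem.Set String) :=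
  rules.foldl (fun d p =>
    ((pvRuleGet p.2 "headers").foldl (fun hd h => hd.modify (PySem.Str.lower h) PySem.Set.empty (fun s => PySem.Set.add s p.1)) d.1,
     (pvRuleGet p.2 "cookies").foldl (fun cd c => cd.modify (PySem.Str.lower c) PySem.Set.empty (fun s => PySem.Set.add s p.1)) d.2))
    (PySem.Dict.empty, PySem.Dict.empty)

def check_headers_and_cookies_py_alt (rules : List (String × List (String × List String))) (headers : List (String × String)) (cookies : List (String × String)) : List String :=
  let idx := pvBuildIndexes rules
  let matchedH := headers.foldl (fun m p => PySem.Set.update m (idx.1.getD (PySem.Str.lower p.1) PySem.Set.empty)) PySem.Set.empty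
  let matched := cookies.foldl (fun m p => PySem.Set.update m (idx.2.getD (PySem.Str.lower p.1) PySem.Set.empty)) matchedH
  rules.foldl (fun out p => if PySem.Set.contains matched p.1 then PySem.Set.add out p.1 else out) PySem.Set.empty

-- ===== PRECONDITION & SPEC =====
-- Pre_ excludes (a) rules lists with duplicate rule names — a Python dict cannot carry them, the assoc
-- list encodes a dict — and (b) rules whose dict lacks a 'headers' or 'cookies' key, on which A raises
-- KeyError (except when the headers branch hits first and `continue` skips the cookie lookup).
def Pre_check_headers_and_cookies_py (rules : List (String × List (String × List String))) (headers : List (String × String)) (cookies : List (String × String)) : Prop :=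
  (rules.map (·.1)).Nodup ∧ ∀ p ∈ rules, ("headers" ∈ p.2.map (·.1)) ∧ ("cookies" ∈ p.2.map (·.1))
instance (rules : List (String × List (String × List String))) (headers : List (String × String)) (cookies : List (String × String)) : Decidable (Pre_check_headers_and_cookies_py rules headers cookies) := by unfold Pre_check_headers_and_cookies_py; infer_instance

def pvWitness_check_headers_and_cookies_py : (List (String × List (String × List String))) × (List (String × String)) × (List (String × String)) :=
  ([("r1", [("headers", ["X-Req"]), ("cookies", [])]), ("r2", [("headers", []), ("cookies", ["sid"])])], [("x-req", "1")], [("SID", "2")])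

def Spec_check_headers_and_cookies_py (rules : List (String × List (String × List String))) (headers : List (String × String)) (cookies : List (String × String)) (out : List String) : Prop := out = check_headers_and_cookies_py_alt rules headers cookies
instance (rules : List (String × List (String × List String))) (headers : List (String × String)) (cookies : List (String × String)) (out : List String) : Decidable (Spec_check_headers_and_cookies_py rules headers cookies out) := by unfold Spec_check_headers_and_cookies_py; infer_instance

-- ===== CLAIM (what is proved, stated in full; the proofs are below) =====
def Claim_equal_check_headers_and_cookies_py : Prop := ∀ (rules : List (String × List (String × List String))) (headers : List (String × String)) (cookies : List (String × String)), Dom_check_headers_and_cookies_py rules headers cookies → Pre_check_headers_and_cookies_py rules headers cookies → Spec_check_headers_and_cookies_py rules headers cookies (check_headers_and_cookies_py rules headers cookies)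

-- ===== LEMMAS AND PROOFS =====

-- a loop `if C(p): out.add(p.name)` over pairs with fresh, distinct names is a filter
theorem foldl_add_if_eq_filter {α : Type} (l : List (String × α)) (C : String × α → Bool)
    (acc : List String) (h : (acc ++ l.map (·.1)).Nodup) :
    l.foldl (fun res p => if C p then PySem.Set.add res p.1 else res) acc
      = acc ++ (l.filter C).map (·.1) := by
  induction l generalizing acc with
  | nil => simp
  | cons p t ih =>
    rw [List.map_cons, List.append_cons] at h
    by_cases hc : C p
    · have hnm : p.1 ∉ acc := by
        have := h.sublist (List.sublist_append_left _ _)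
        simp [List.nodup_append] at this
        tauto
      rw [List.foldl_cons, if_pos hc, PySem.Set.add_of_not_mem hnm, ih _ h]
      simp [hc]
    · rw [List.foldl_cons, if_neg hc, ih]
      · simp [hc]
      · have : (acc ++ List.map (fun x => x.1) t).Sublist ((acc ++ [p.1]) ++ List.map (fun x => x.1) t) := by
          apply List.Sublist.append _ (List.Sublist.refl _)
          exact List.sublist_append_left _ _
        exact h.sublist this

-- membership in one index entry after `for h in ks: d.setdefault(h, set()).add(nm)`
theorem mem_getD_modify_fold (ks : List String) (d : PySem.Dict String (PySem.Set String))
    (nm key y : String) :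
    y ∈ (ks.foldl (fun d k => d.modify k PySem.Set.empty (fun s => PySem.Set.add s nm)) d).getD key PySem.Set.empty
      ↔ y ∈ d.getD key PySem.Set.empty ∨ (y = nm ∧ key ∈ ks) := by
  induction ks generalizing d with
  | nil => simp
  | cons k t ih =>
    rw [List.foldl_cons, ih, PySem.Dict.getD_modify]
    by_cases hk : key = k
    · subst hk; simp [PySem.Set.mem_add]; tauto
    · simp [hk]

-- membership in an inverted index built over all rules
theorem mem_getD_index_fold (l : List (String × List (String × List String))) (sel : String)
    (d : PySem.Dict String (PySem.Set String)) (key y : String) :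
    y ∈ (l.foldl (fun d p => (pvRuleGet p.2 sel).foldl (fun hd h => hd.modify (PySem.Str.lower h) PySem.Set.empty (fun s => PySem.Set.add s p.1)) d) d).getD key PySem.Set.empty
      ↔ y ∈ d.getD key PySem.Set.empty ∨ ∃ p ∈ l, y = p.1 ∧ key ∈ (pvRuleGet p.2 sel).map PySem.Str.lower := by
  induction l generalizing d with
  | nil => simp
  | cons p t ih =>
    have hmap : List.foldl (fun hd h => hd.modify (PySem.Str.lower h) PySem.Set.empty fun s => s.add p.1) d (pvRuleGet p.2 sel)
        = List.foldl (fun hd k => hd.modify k PySem.Set.empty fun s => s.add p.1) d (List.map PySem.Str.lower (pvRuleGet p.2 sel)) :=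
      by rw [List.foldl_map]
    rw [List.foldl_cons, ih, hmap, mem_getD_modify_fold]
    simp only [List.mem_cons, exists_eq_or_imp]
    tauto

theorem mem_foldl_update {α : Type} [BEq α] [LawfulBEq α] (l : List (String × String))
    (g : String × String → List α) (m : PySem.Set α) (y : α) :
    y ∈ l.foldl (fun m p => PySem.Set.update m (g p)) m ↔ y ∈ m ∨ ∃ p ∈ l, y ∈ g p := by
  induction l generalizing m with
  | nil => simp
  | cons p t ih =>
    rw [List.foldl_cons, ih, PySem.Set.mem_update]
    simp only [List.mem_cons, exists_eq_or_imp]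
    tauto

theorem keys_pvKeysDict (h : List (String × String)) :
    (pvKeysDict h).keys = PySem.Set.ofList (h.map (fun q => PySem.Str.lower q.1)) := by
  unfold pvKeysDict
  cases h with
  | nil => simp [PySem.Dict.keys_empty, PySem.Set.ofList_nil]
  | cons q t =>
    simp only [List.isEmpty_cons, Bool.not_false, if_pos]
    unfold PySem.Dict.ofList PySem.Dict.update
    rw [PySem.Dict.keys_foldl_insert_key (List.map (fun p => (PySem.Str.lower p.1, p.2)) (q :: t)) (fun x => x.1) (fun _ x => x.2)]
    simp only [PySem.Dict.keys_empty, List.map_map, Function.comp_def, List.map_cons]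
    exact (PySem.Set.ofList_append [PySem.Str.lower q.1] _).symm

theorem items_pvKeysDict_ne_nil (h : List (String × String)) :
    ((pvKeysDict h).items.isEmpty = false) ↔ h ≠ [] := by
  have hk : (pvKeysDict h).keys = (pvKeysDict h).items.map (·.1) := rfl
  constructor
  · intro hi hnil; subst hnil
    simp [pvKeysDict, PySem.Dict.empty] at hi
  · intro hne
    cases h with
    | nil => exact absurd rfl hne
    | cons q t =>
      have : PySem.Str.lower q.1 ∈ (pvKeysDict (q :: t)).keys := by
        rw [keys_pvKeysDict]
        rw [PySem.Set.mem_ofList]; simp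
      rw [hk] at this
      rcases List.mem_map.mp this with ⟨p, hp, _⟩
      rw [List.isEmpty_eq_false_iff_exists_mem]
      exact ⟨p, hp⟩

-- "rule p matches the request `req` on key list `sel`"
def pvHitB (req : List (String × String)) (sel : String) (p : String × List (String × List String)) : Bool :=
  (pvRuleGet p.2 sel).any (fun h => req.any (fun q => PySem.Str.lower h == PySem.Str.lower q.1))

theorem pvHitB_iff (req : List (String × String)) (sel : String) (p : String × List (String × List String)) :
    pvHitB req sel p = true ↔ ∃ h ∈ pvRuleGet p.2 sel, ∃ q ∈ req, PySem.Str.lower h = PySem.Str.lower q.1 := by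
  simp [pvHitB]

theorem condA_iff (req : List (String × String)) (sel : String) (p : String × List (String × List String)) :
    (!(pvRuleGet p.2 sel).isEmpty && !(pvKeysDict req).items.isEmpty &&
      !(PySem.Set.inter (PySem.Set.ofList ((pvRuleGet p.2 sel).map PySem.Str.lower)) (pvKeysDict req).keys).isEmpty) = true
      ↔ pvHitB req sel p = true := by
  rw [pvHitB_iff, Bool.and_eq_true, Bool.and_eq_true]
  constructor
  · rintro ⟨⟨-, -⟩, hint⟩
    rw [Bool.not_eq_true', List.isEmpty_eq_false_iff_exists_mem] at hint
    rcases hint with ⟨x, hx⟩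
    rw [PySem.Set.mem_inter, PySem.Set.mem_ofList, keys_pvKeysDict, PySem.Set.mem_ofList] at hx
    rcases hx with ⟨hx1, hx2⟩
    rcases List.mem_map.mp hx1 with ⟨h, hh, rfl⟩
    rcases List.mem_map.mp hx2 with ⟨q, hq, he⟩
    exact ⟨h, hh, q, hq, he.symm⟩
  · rintro ⟨h, hh, q, hq, he⟩
    refine ⟨⟨?_, ?_⟩, ?_⟩
    · rw [Bool.not_eq_true', List.isEmpty_eq_false_iff_exists_mem]; exact ⟨h, hh⟩
    · rw [Bool.not_eq_true', items_pvKeysDict_ne_nil]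
      intro hnil; subst hnil; simp at hq
    · rw [Bool.not_eq_true', List.isEmpty_eq_false_iff_exists_mem]
      refine ⟨PySem.Str.lower h, ?_⟩
      rw [PySem.Set.mem_inter, PySem.Set.mem_ofList, keys_pvKeysDict, PySem.Set.mem_ofList]
      exact ⟨List.mem_map.mpr ⟨h, hh, rfl⟩, List.mem_map.mpr ⟨q, hq, he.symm⟩⟩

-- A's per-rule condition, flattened to one boolean
def pvCondA (headers cookies : List (String × String)) (p : String × List (String × List String)) : Bool :=
  (!(pvRuleGet p.2 "headers").isEmpty && !(pvKeysDict headers).items.isEmpty &&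
    !(PySem.Set.inter (PySem.Set.ofList ((pvRuleGet p.2 "headers").map PySem.Str.lower)) (pvKeysDict headers).keys).isEmpty)
  || (!(pvRuleGet p.2 "cookies").isEmpty && !(pvKeysDict cookies).items.isEmpty &&
    !(PySem.Set.inter (PySem.Set.ofList ((pvRuleGet p.2 "cookies").map PySem.Str.lower)) (pvKeysDict cookies).keys).isEmpty)

theorem A_eq (rules : List (String × List (String × List String))) (headers cookies : List (String × String))
    (hnd : (rules.map (·.1)).Nodup) :
    check_headers_and_cookies_py rules headers cookies
      = (rules.filter (fun p => pvHitB headers "headers" p || pvHitB cookies "cookies" p)).map (·.1) := by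
  unfold check_headers_and_cookies_py
  rw [PySem.List.foldl_congr_mem _ _ (fun res p => if pvCondA headers cookies p then PySem.Set.add res p.1 else res) _ ?_]
  · rw [foldl_add_if_eq_filter _ _ PySem.Set.empty (by simpa [PySem.Set.empty] using hnd)]
    simp only [PySem.Set.empty, List.nil_append]
    congr 1
    apply List.filter_congr
    intro p _
    rw [Bool.eq_iff_iff]
    unfold pvCondA
    rw [Bool.or_eq_true, Bool.or_eq_true, condA_iff, condA_iff]
  · intro acc p _
    simp only
    by_cases h1 : (!(pvRuleGet p.2 "headers").isEmpty && !(pvKeysDict headers).items.isEmpty) <;>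
    by_cases h2 : (!(PySem.Set.inter (PySem.Set.ofList ((pvRuleGet p.2 "headers").map PySem.Str.lower)) (pvKeysDict headers).keys).isEmpty) <;>
    by_cases h3 : (!(pvRuleGet p.2 "cookies").isEmpty && !(pvKeysDict cookies).items.isEmpty) <;>
    by_cases h4 : (!(PySem.Set.inter (PySem.Set.ofList ((pvRuleGet p.2 "cookies").map PySem.Str.lower)) (pvKeysDict cookies).keys).isEmpty) <;>
    simp_all [pvCondA, Bool.and_eq_true] <;> first | tauto | (split_ifs <;> tauto)

theorem pvBuildIndexes_eq (rules : List (String × List (String × List String))) :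
    pvBuildIndexes rules =
      (rules.foldl (fun d p => (pvRuleGet p.2 "headers").foldl (fun hd h => hd.modify (PySem.Str.lower h) PySem.Set.empty (fun s => PySem.Set.add s p.1)) d) PySem.Dict.empty,
       rules.foldl (fun d p => (pvRuleGet p.2 "cookies").foldl (fun hd h => hd.modify (PySem.Str.lower h) PySem.Set.empty (fun s => PySem.Set.add s p.1)) d) PySem.Dict.empty) := by
  unfold pvBuildIndexes
  exact PySem.List.foldl_prod_mk
    (fun hd p => (pvRuleGet p.2 "headers").foldl (fun hd h => hd.modify (PySem.Str.lower h) PySem.Set.empty (fun s => PySem.Set.add s p.1)) hd)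
    (fun cd p => (pvRuleGet p.2 "cookies").foldl (fun cd c => cd.modify (PySem.Str.lower c) PySem.Set.empty (fun s => PySem.Set.add s p.1)) cd)
    rules PySem.Dict.empty PySem.Dict.empty

theorem B_eq (rules : List (String × List (String × List String))) (headers cookies : List (String × String))
    (hnd : (rules.map (·.1)).Nodup) :
    check_headers_and_cookies_py_alt rules headers cookies
      = (rules.filter (fun p => pvHitB headers "headers" p || pvHitB cookies "cookies" p)).map (·.1) := by
  unfold check_headers_and_cookies_py_alt
  simp only [pvBuildIndexes_eq]
  rw [foldl_add_if_eq_filter _ _ PySem.Set.empty (by simpa [PySem.Set.empty] using hnd)]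
  rw [show ∀ l : List String, (PySem.Set.empty : List String) ++ l = l from fun _ => rfl]
  congr 1
  apply List.filter_congr
  intro p hp
  rw [Bool.eq_iff_iff, PySem.Set.contains_iff]
  rw [mem_foldl_update, mem_foldl_update]
  simp only [mem_getD_index_fold, PySem.Dict.getD_empty]
  simp only [show (PySem.Set.empty : List String) = [] from rfl, List.not_mem_nil, false_or]
  rw [Bool.or_eq_true, pvHitB_iff, pvHitB_iff]
  constructor
  · rintro ((⟨q, hq, p', hp', heq, hkey⟩) | ⟨q, hq, p', hp', heq, hkey⟩)
    · left
      have hpp : p = p' := List.inj_on_of_nodup_map hnd hp hp' heq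
      subst hpp
      rcases List.mem_map.mp hkey with ⟨h, hh, he⟩
      exact ⟨h, hh, q, hq, he⟩
    · right
      have hpp : p = p' := List.inj_on_of_nodup_map hnd hp hp' heq
      subst hpp
      rcases List.mem_map.mp hkey with ⟨h, hh, he⟩
      exact ⟨h, hh, q, hq, he⟩
  · rintro (⟨h, hh, q, hq, he⟩ | ⟨h, hh, q, hq, he⟩)
    · exact Or.inl ⟨q, hq, p, hp, rfl, List.mem_map.mpr ⟨h, hh, he⟩⟩
    · exact Or.inr ⟨q, hq, p, hp, rfl, List.mem_map.mpr ⟨h, hh, he⟩⟩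

-- ===== VERDICT (by name: the statement is the Claim_ definition above) =====
theorem check_headers_and_cookies_py_spec : Claim_equal_check_headers_and_cookies_py := by
  intro rules headers cookies _ hpre
  unfold Spec_check_headers_and_cookies_py
  rw [A_eq rules headers cookies hpre.1, B_eq rules headers cookies hpre.1]
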